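-- pv_equiv track=rewrite | github.com/orez-/python-sundry | hr_xword/main.py | find_slots
-- ===== SOURCE A (Python) =====
-- import itertools
--
-- def find_slots(shape):
--     for y, line in enumerate(shape):
--         start = None
--         line = iter(enumerate(itertools.chain(line, '+')))
--         while True:
--             for start, elem in line:
--                 if elem == '-':
--                     break
--             for end, elem in line:
--                 if elem != '-':
--                     length = end - start
--                     if length > 1:
--                         yield y, start, end
--                     break
--             else:
--                 break
-- ===== SOURCE B (Python) =====
-- import re
--
-- def find_slots(shape):
--     for y, line in enumerate(shape):
--         for m in re.finditer(r'-{2,}', line):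
--             yield y, m.start(), m.end()
-- ===== Notes on version B (the rewrite author's own statement) =====
-- stated objective: idiomatic
-- what changed: Replaces A's hand-rolled iterator state machine (shared enumerate iterator consumed by two inner for-loops plus a '+' sentinel) with a regex scan: re.finditer(r'-{2,}') per row directly yields each maximal dash run of length >= 2.
import Mathlib
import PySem

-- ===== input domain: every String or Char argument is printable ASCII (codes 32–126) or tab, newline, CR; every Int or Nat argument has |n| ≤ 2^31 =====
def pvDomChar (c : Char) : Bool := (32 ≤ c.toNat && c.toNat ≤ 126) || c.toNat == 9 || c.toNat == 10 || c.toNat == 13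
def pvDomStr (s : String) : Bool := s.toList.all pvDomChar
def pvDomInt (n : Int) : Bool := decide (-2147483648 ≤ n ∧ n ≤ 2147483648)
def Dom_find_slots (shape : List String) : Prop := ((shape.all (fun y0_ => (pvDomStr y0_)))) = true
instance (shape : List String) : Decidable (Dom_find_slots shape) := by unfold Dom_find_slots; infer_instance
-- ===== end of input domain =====

-- B replaces A's hand-rolled two-for iterator state machine (with a '+' sentinel) by a
-- per-row regex scan re.finditer(r'-{2,}'); same values, same order (objective: idiomatic).
-- Both the Python A (a generator) and B yield lazily; equivalence is about the produced sequence as a list.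

-- ===== PORT A =====
-- A's row machine: the shared iterator over enumerate(chain(line, '+')) with the two inner
-- for-loops fused into one recursion whose Option state says whether a run start was seen
-- (none = first for-loop scanning for '-'; some s = second for-loop scanning for the end).
def rowA (y : Int) : List (Int × Char) → Option Int → List (Int × Int × Int)
  | [], _ => []                                           -- iterator exhausted: for-else break
  | (i, c) :: rest, none =>
      if c = '-' then rowA y rest (some i) else rowA y rest none
  | (i, c) :: rest, some s =>
      if c ≠ '-' then
        (if i - s > 1 then [(y, s, i)] else []) ++ rowA y rest none
      else rowA y rest (some s)

def find_slots (shape : List String) : List (Int × Int × Int) :=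
  (PySem.List.enumerate shape 0).flatMap
    (fun p => rowA p.1 (PySem.List.enumerate (p.2.toList ++ ['+']) 0) none)

-- ===== PORT B =====
-- re.finditer(r'-{2,}', line) ported by hand (exact for this pattern): a left-to-right scan
-- emitting each maximal run of '-' of length ≥ 2 with its (start, end) positions.
def rowB (y : Int) (i : Int) : List Char → List (Int × Int × Int)
  | [] => []
  | c :: rest =>
      if c = '-' then
        let n : Int := (rest.takeWhile (· = '-')).length + 1
        (if 2 ≤ n then [(y, i, i + n)] else []) ++ rowB y (i + n) (rest.dropWhile (· = '-'))
      else rowB y (i + 1) rest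
  termination_by cs => cs.length
  decreasing_by
    · exact Nat.lt_succ_of_le (List.length_dropWhile_le _ _)
    · simp

def find_slots_alt (shape : List String) : List (Int × Int × Int) :=
  (PySem.List.enumerate shape 0).flatMap (fun p => rowB p.1 0 p.2.toList)

-- ===== PRECONDITION & SPEC =====
def Spec_find_slots (shape : List String) (out : List (Int × Int × Int)) : Prop := out = find_slots_alt shape
instance (shape : List String) (out : List (Int × Int × Int)) : Decidable (Spec_find_slots shape out) := by unfold Spec_find_slots; infer_instance

-- ===== CLAIM (what is proved, stated in full; the proofs are below) =====
def Claim_equal_find_slots : Prop := ∀ (shape : List String), Dom_find_slots shape → Spec_find_slots shape (find_slots shape)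

-- ===== LEMMAS AND PROOFS =====

-- Inside a run (state = some s): A consumes the dash prefix, yields at its end, resumes with none.
lemma rowA_some (y s : Int) : ∀ (cs : List Char) (i : Int),
    rowA y (PySem.List.enumerate (cs ++ ['+']) i) (some s)
      = (if i + (cs.takeWhile (· = '-')).length - s > 1
           then [(y, s, i + (cs.takeWhile (· = '-')).length)] else [])
        ++ rowA y (PySem.List.enumerate (cs.dropWhile (· = '-') ++ ['+']) (i + (cs.takeWhile (· = '-')).length)) none := by
  intro cs
  induction cs with
  | nil =>
      intro i
      simp [PySem.List.enumerate_cons, PySem.List.enumerate_nil, rowA]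
  | cons c rest ih =>
      intro i
      by_cases hc : c = '-'
      · subst hc
        simp only [List.cons_append, PySem.List.enumerate_cons, rowA, List.takeWhile_cons,
          List.dropWhile_cons, decide_eq_true_eq, reduceIte, List.length_cons]
        rw [if_neg (by simp)]
        rw [ih (i + 1)]
        have h : i + 1 + ((rest.takeWhile (· = '-')).length : Int)
            = i + (((rest.takeWhile (· = '-')).length : Int) + 1) := by ring
        rw [h]
        push_cast
        rfl
      · simp [PySem.List.enumerate_cons, rowA, hc]

-- Scanning (state = none): A on the sentineled enumerated row equals B's regex-style run scan.
lemma rowA_none (y : Int) : ∀ (N : Nat) (cs : List Char), cs.length ≤ N → ∀ (i : Int),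
    rowA y (PySem.List.enumerate (cs ++ ['+']) i) none = rowB y i cs := by
  intro N
  induction N with
  | zero =>
      intro cs h i
      have : cs = [] := List.eq_nil_of_length_eq_zero (Nat.le_zero.mp h)
      subst this
      simp [PySem.List.enumerate_cons, PySem.List.enumerate_nil, rowA, rowB]
  | succ n ih =>
      intro cs h i
      cases cs with
      | nil => simp [PySem.List.enumerate_cons, PySem.List.enumerate_nil, rowA, rowB]
      | cons c rest =>
        by_cases hc : c = '-'
        · subst hc
          rw [rowB]
          simp only [List.cons_append, PySem.List.enumerate_cons, rowA, reduceIte]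
          rw [rowA_some y i rest (i + 1)]
          rw [ih (rest.dropWhile (· = '-'))
            (Nat.le_trans (List.length_dropWhile_le _ _) (Nat.le_of_succ_le_succ h))]
          have h1 : i + 1 + ((rest.takeWhile (· = '-')).length : Int) - i
              = ((rest.takeWhile (· = '-')).length : Int) + 1 := by ring
          have h2 : i + 1 + ((rest.takeWhile (· = '-')).length : Int)
              = i + (((rest.takeWhile (· = '-')).length : Int) + 1) := by ring
          rw [h1, h2]
          have h3 : ((((rest.takeWhile (· = '-')).length : Int) + 1 > 1)
              = (2 ≤ ((rest.takeWhile (· = '-')).length : Int) + 1)) := by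
            simp only [eq_iff_iff]; omega
          simp only [h3]
        · rw [rowB]
          simp only [PySem.List.enumerate_cons, List.cons_append, rowA, hc, reduceIte]
          exact ih rest (by simp at h; omega) (i + 1)

-- ===== VERDICT (by name: the statement is the Claim_ definition above) =====
theorem find_slots_spec : Claim_equal_find_slots := by
  intro shape _
  unfold Spec_find_slots find_slots find_slots_alt
  apply List.flatMap_congr
  intro p _
  exact rowA_none p.1 p.2.toList.length p.2.toList le_rfl 0
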